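-- pv_equiv track=rewrite | github.com/KhalidMas23/bananabot | core/solver.py | _hand_after_using
-- ===== SOURCE A (Python) =====
-- from collections import Counter
--
-- def _hand_after_using(hand: Counter[str], used_from_hand: list[str]) -> list[str]:
--     h = hand.copy()
--     for ch in used_from_hand:
--         u = ch.upper()
--         h[u] -= 1
--         if h[u] < 0:
--             raise ValueError("hand multiset underflow")
--     out: list[str] = []
--     for letter in sorted(h.keys()):
--         out.extend([letter] * h[letter])
--     return out
-- ===== SOURCE B (Python) =====
-- def _hand_after_using(hand, used_from_hand):
--     letters = sorted(letter for letter, n in hand.items() for _ in range(n))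
--     for ch in used_from_hand:
--         try:
--             letters.remove(ch.upper())
--         except ValueError:
--             raise ValueError("hand multiset underflow")
--     return letters
-- ===== Notes on version B (the rewrite author's own statement) =====
-- stated objective: alternative
-- what changed: B never keeps counts: it expands the hand into one sorted list of letters up front and then deletes one occurrence per used letter from that list (list.remove), raising underflow when the letter is absent, instead of A's Counter copy with a decrement-and-check loop followed by a sorted-keys/extend output pass.
import Mathlib
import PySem

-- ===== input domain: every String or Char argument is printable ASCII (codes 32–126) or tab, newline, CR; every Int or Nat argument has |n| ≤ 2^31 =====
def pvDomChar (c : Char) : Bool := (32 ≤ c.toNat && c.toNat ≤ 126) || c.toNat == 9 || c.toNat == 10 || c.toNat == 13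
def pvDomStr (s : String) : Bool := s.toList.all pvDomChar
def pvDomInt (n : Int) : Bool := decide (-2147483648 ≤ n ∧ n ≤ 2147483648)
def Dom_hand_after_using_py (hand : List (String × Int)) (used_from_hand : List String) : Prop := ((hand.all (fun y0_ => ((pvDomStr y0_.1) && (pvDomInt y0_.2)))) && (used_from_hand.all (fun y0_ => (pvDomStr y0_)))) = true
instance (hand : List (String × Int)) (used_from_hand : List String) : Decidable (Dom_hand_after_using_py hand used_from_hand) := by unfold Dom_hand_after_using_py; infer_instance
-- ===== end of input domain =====

-- B keeps no counts at all: it expands the hand into one sorted letter list up front and then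
-- deletes one occurrence per used letter from that list (list.remove), instead of A's Counter
-- copy with a decrement-and-check loop plus a sorted-keys/extend output pass; objective:
-- alternative. Equivalence is about the return value (neither version mutates its input).

-- ===== PORT A =====
-- the decrement loop; 'none' = ValueError("hand multiset underflow")
def handAUse (h : PySem.Dict String Int) : List String → Option (PySem.Dict String Int)
  | [] => some h
  | ch :: rest =>
    let u := PySem.Str.upper ch
    let h' := h.insert u (h.getD u 0 - 1)
    if h'.getD u 0 < 0 then none
    else handAUse h' rest

def hand_after_using_py (hand : List (String × Int)) (used_from_hand : List String) : List String :=
  match handAUse (PySem.Dict.mk hand) used_from_hand with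
  | none => []   -- the raise; these inputs are excluded by Pre_
  | some h =>
    (PySem.List.sorted h.keys (fun x => x)).foldl
      (fun out letter => out ++ PySem.List.pyRepeat [letter] (h.getD letter 0)) []

-- ===== PORT B =====
-- the removal loop; 'none' = ValueError("hand multiset underflow") (letters.remove failed)
def handBRemove (letters : List String) : List String → Option (List String)
  | [] => some letters
  | ch :: rest =>
    match PySem.List.remove? letters (PySem.Str.upper ch) with
    | none => none
    | some l' => handBRemove l' rest

def hand_after_using_py_alt (hand : List (String × Int)) (used_from_hand : List String) : List String :=
  -- letters = sorted(letter for letter, n in hand.items() for _ in range(n))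
  let letters := PySem.List.sorted
      ((PySem.Dict.mk hand).items.flatMap (fun p => List.replicate p.2.toNat p.1)) (fun x => x)
  match handBRemove letters used_from_hand with
  | none => []   -- the raise; excluded by Pre_
  | some l => l

-- ===== PRECONDITION & SPEC =====
-- Pre_ excludes (a) inputs where A raises ValueError("hand multiset underflow"), i.e. some
-- uppercased used letter occurs more often than the hand holds it (B raises there too), and
-- (b) hand lists with duplicate keys, which do not represent a Counter (Python's dict
-- construction collapses duplicates, so the association list is not the Counter's content).
def Pre_hand_after_using_py (hand : List (String × Int)) (used_from_hand : List String) : Prop :=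
  (hand.map Prod.fst).Nodup ∧
  ∀ u ∈ used_from_hand.map PySem.Str.upper,
    (((used_from_hand.map PySem.Str.upper).count u : Int)) ≤ (PySem.Dict.mk hand).getD u 0
instance (hand : List (String × Int)) (used_from_hand : List String) : Decidable (Pre_hand_after_using_py hand used_from_hand) := by unfold Pre_hand_after_using_py; infer_instance

def pvWitness_hand_after_using_py : (List (String × Int)) × List String :=
  ([("A", 2), ("B", 1)], ["a"])

def Spec_hand_after_using_py (hand : List (String × Int)) (used_from_hand : List String) (out : List String) : Prop := out = hand_after_using_py_alt hand used_from_hand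
instance (hand : List (String × Int)) (used_from_hand : List String) (out : List String) : Decidable (Spec_hand_after_using_py hand used_from_hand out) := by unfold Spec_hand_after_using_py; infer_instance

-- ===== CLAIM (what is proved, stated in full; the proofs are below) =====
def Claim_equal_hand_after_using_py : Prop := ∀ (hand : List (String × Int)) (used_from_hand : List String), Dom_hand_after_using_py hand used_from_hand → Pre_hand_after_using_py hand used_from_hand → Spec_hand_after_using_py hand used_from_hand (hand_after_using_py hand used_from_hand)

-- ===== LEMMAS AND PROOFS =====

-- getD after A's decrement fold: initial value minus the count of the uppercased letter
lemma getD_decFold (l : List String) (d : PySem.Dict String Int) (v : String) :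
    (l.foldl (fun d ch => d.insert (PySem.Str.upper ch) (d.getD (PySem.Str.upper ch) 0 - 1)) d).getD v 0
      = d.getD v 0 - ((l.map PySem.Str.upper).count v : Int) := by
  induction l generalizing d with
  | nil => simp
  | cons ch rest ih =>
    simp only [List.foldl_cons, ih, List.map_cons, List.count_cons]
    rw [PySem.Dict.getD_insert]
    by_cases h : v = PySem.Str.upper ch
    · simp [h]; ring
    · simp [h, Ne.symm h]

-- under the no-underflow condition A's loop never raises and equals the plain fold
lemma handAUse_eq_fold (l : List String) (d : PySem.Dict String Int)
    (hs : ∀ u ∈ l.map PySem.Str.upper, ((l.map PySem.Str.upper).count u : Int) ≤ d.getD u 0) :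
    handAUse d l =
      some (l.foldl (fun d ch => d.insert (PySem.Str.upper ch) (d.getD (PySem.Str.upper ch) 0 - 1)) d) := by
  induction l generalizing d with
  | nil => rfl
  | cons ch rest ih =>
    have hu := hs (PySem.Str.upper ch) (by simp)
    have hcnt : ((rest.map PySem.Str.upper).count (PySem.Str.upper ch) : Int) + 1
        ≤ d.getD (PySem.Str.upper ch) 0 := by
      simpa [List.count_cons] using hu
    have hge : (0:Int) ≤ d.getD (PySem.Str.upper ch) 0 - 1 := by
      have : (0:Int) ≤ ((rest.map PySem.Str.upper).count (PySem.Str.upper ch) : Int) := by positivity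
      omega
    simp only [handAUse, PySem.Dict.getD_insert_self, List.foldl_cons]
    rw [if_neg (by omega)]
    apply ih
    intro v hv
    rw [PySem.Dict.getD_insert]
    by_cases h : v = PySem.Str.upper ch
    · subst h
      simp only [if_true]
      omega
    · rw [if_neg h]
      have := hs v (by simp only [List.map_cons]; exact List.mem_cons_of_mem _ hv)
      have hle : (rest.map PySem.Str.upper).count v ≤ ((ch :: rest).map PySem.Str.upper).count v := by
        simp [List.count_cons]
      omega

lemma set_update_of_subset {s : PySem.Set String} {xs : List String} (h : ∀ x ∈ xs, x ∈ s) :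
    PySem.Set.update s xs = s := by
  induction xs generalizing s with
  | nil => rfl
  | cons x t ih =>
    have hx : PySem.Set.add s x = s := PySem.Set.add_of_mem (h x (by simp))
    show PySem.Set.update (PySem.Set.add s x) t = s
    rw [hx]
    exact ih (fun y hy => h y (List.mem_cons_of_mem _ hy))

-- expanding a ≤-sorted key list into constant blocks stays ≤-sorted
lemma pairwise_flatMap_replicate (l : List String) (n : String → Nat)
    (h : l.Pairwise (· ≤ ·)) :
    (l.flatMap (fun k => List.replicate (n k) k)).Pairwise (· ≤ ·) := by
  induction l with
  | nil => simp
  | cons k t ih =>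
    simp only [List.flatMap_cons]
    rw [List.pairwise_append]
    refine ⟨List.pairwise_replicate.mpr (Or.inr le_rfl), ih h.tail, ?_⟩
    intro a ha b hb
    obtain ⟨k', hk', hb'⟩ := List.mem_flatMap.mp hb
    rw [List.eq_of_mem_replicate ha, List.eq_of_mem_replicate hb']
    exact List.rel_of_pairwise_cons h hk'

-- multiplicity in a constant-block expansion over distinct keys
lemma count_flatMap_replicate (l : List String) (n : String → Nat) (hnd : l.Nodup) (x : String) :
    (l.flatMap (fun k => List.replicate (n k) k)).count x = if x ∈ l then n x else 0 := by
  induction l with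
  | nil => simp
  | cons k t ih =>
    simp only [List.flatMap_cons, List.count_append, ih hnd.of_cons, List.count_replicate]
    by_cases h : x = k
    · subst h
      have hx : x ∉ t := (List.nodup_cons.mp hnd).1
      simp [hx]
    · simp [h, Ne.symm h, List.mem_cons]

-- B's removal loop succeeds and removes exactly the multiset of uppercased used letters
lemma handBRemove_spec (us : List String) (L : List String)
    (h : ∀ u ∈ us.map PySem.Str.upper, (us.map PySem.Str.upper).count u ≤ L.count u) :
    ∃ r, handBRemove L us = some r ∧ r.Sublist L ∧
      ∀ x, r.count x = L.count x - (us.map PySem.Str.upper).count x := by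
  induction us generalizing L with
  | nil => exact ⟨L, rfl, List.Sublist.refl L, by simp⟩
  | cons ch rest ih =>
    have hmem : PySem.Str.upper ch ∈ L := by
      have h1 := h (PySem.Str.upper ch) (by simp)
      rw [List.map_cons, List.count_cons_self] at h1
      exact List.count_pos_iff.mp (by omega)
    have hcond : ∀ v ∈ rest.map PySem.Str.upper,
        (rest.map PySem.Str.upper).count v ≤ (L.erase (PySem.Str.upper ch)).count v := by
      intro v hv
      have hv' := h v (by simp only [List.map_cons]; exact List.mem_cons_of_mem _ hv)
      rw [List.count_erase]
      by_cases hvu : v = PySem.Str.upper ch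
      · subst hvu
        simp only [List.map_cons, List.count_cons_self] at hv'
        simp only [beq_self_eq_true, if_true]
        omega
      · have hb : (PySem.Str.upper ch == v) = false := by simp [Ne.symm hvu]
        rw [hb]
        have hle : List.count v (rest.map PySem.Str.upper)
            ≤ List.count v ((ch :: rest).map PySem.Str.upper) := by
          simp [List.count_cons]
        simp only [Bool.false_eq_true, if_false]
        omega
    obtain ⟨r, hr, hsub, hcnt⟩ := ih (L.erase (PySem.Str.upper ch)) hcond
    refine ⟨r, ?_, hsub.trans List.erase_sublist, ?_⟩
    · simp only [handBRemove, PySem.List.remove?_eq_some_erase L (PySem.Str.upper ch) hmem, hr]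
    · intro x
      rw [hcnt x, List.count_erase, List.map_cons, List.count_cons]
      have h1 := h (PySem.Str.upper ch) (by simp)
      rw [List.map_cons, List.count_cons_self] at h1
      by_cases hx : x = PySem.Str.upper ch
      · subst hx
        simp only [beq_self_eq_true, if_true]
        omega
      · have hb : (PySem.Str.upper ch == x) = false := by simp [Ne.symm hx]
        rw [hb]
        simp only [Bool.false_eq_true, if_false]
        omega

-- ===== VERDICT (by name: the statement is the Claim_ definition above) =====
theorem hand_after_using_py_spec : Claim_equal_hand_after_using_py := by
  intro hand used _hdom hpre
  obtain ⟨hnodup, hcount⟩ := hpre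
  unfold Spec_hand_after_using_py hand_after_using_py hand_after_using_py_alt
  set H := PySem.Dict.mk hand with hH
  set U := used.map PySem.Str.upper with hU
  have hkeysH : H.keys = hand.map Prod.fst := by simp [hH, PySem.Dict.keys]
  have hndk : H.keys.Nodup := by rw [hkeysH]; exact hnodup
  -- every used (uppercased) letter is a key of the hand
  have hmemk : ∀ u ∈ U, u ∈ H.keys := by
    intro u hu
    have h1 : (1:Int) ≤ (U.count u : Int) := by
      have := List.count_pos_iff.mpr hu
      exact_mod_cast this
    have hpos : (0:Int) < H.getD u 0 := lt_of_lt_of_le (by omega) (hcount u hu)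
    by_contra hnot
    have : H.contains u = false := by
      rw [PySem.Dict.contains_eq_decide_mem_keys]; simp [hnot]
    rw [PySem.Dict.getD_of_not_contains H 0 this] at hpos
    omega
  -- A's loop terminates normally
  rw [handAUse_eq_fold used H (fun u hu => hcount u hu)]
  dsimp only
  set hf := used.foldl (fun d ch => d.insert (PySem.Str.upper ch) (d.getD (PySem.Str.upper ch) 0 - 1)) H with hhf
  -- A's output loop = flatMap of replicates over the sorted keys
  rw [PySem.List.foldl_append_eq_flatMap
        (g := fun letter => PySem.List.pyRepeat [letter] (hf.getD letter 0))]
  simp only [List.nil_append, PySem.List.pyRepeat_singleton]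
  -- keys survive the decrement fold unchanged
  have hkeys : hf.keys = H.keys := by
    rw [hhf, PySem.Dict.keys_foldl_insert_key used PySem.Str.upper
          (fun d x => d.getD (PySem.Str.upper x) 0 - 1) H]
    exact set_update_of_subset (by rw [← hU]; exact hmemk)
  rw [hkeys]
  have hfin : ∀ k, hf.getD k 0 = H.getD k 0 - (U.count k : Int) := fun k => getD_decFold used H k
  -- B's expansion, rewritten over the keys, and its multiplicities
  have hitems : H.items.flatMap (fun p => List.replicate p.2.toNat p.1)
      = H.keys.flatMap (fun k => List.replicate (H.getD k 0).toNat k) := by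
    rw [PySem.Dict.items_eq_map_keys H hndk 0, List.flatMap_map]
  set E := H.items.flatMap (fun p => List.replicate p.2.toNat p.1) with hE
  have hcntE : ∀ x, E.count x = if x ∈ H.keys then (H.getD x 0).toNat else 0 := by
    intro x
    rw [hitems, count_flatMap_replicate H.keys _ hndk x]
  set L := PySem.List.sorted E (fun x => x) with hL
  have hcntL : ∀ x, L.count x = E.count x := fun x =>
    (PySem.List.sorted_perm E (fun x => x) false).count_eq x
  -- B's removal loop succeeds
  have hBcond : ∀ u ∈ U, U.count u ≤ L.count u := by
    intro u hu
    rw [hcntL, hcntE, if_pos (hmemk u hu)]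
    have := hcount u hu
    omega
  obtain ⟨r, hr, hsub, hcntr⟩ := handBRemove_spec used L (by rw [← hU]; exact hBcond)
  rw [hr]
  -- both sides are ≤-sorted lists of the same multiset, hence equal
  have hsortedKeys : (PySem.List.sorted H.keys (fun x => x)).Pairwise (· ≤ ·) := by
    have := PySem.List.sorted_pairwise H.keys (fun x => x)
    simpa using this
  have hndsk : (PySem.List.sorted H.keys (fun x => x)).Nodup :=
    ((PySem.List.sorted_perm H.keys (fun x => x) false).nodup_iff).mpr hndk
  have hpairA : (List.flatMap (fun k => List.replicate (hf.getD k 0).toNat k)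
      (PySem.List.sorted H.keys (fun x => x))).Pairwise (· ≤ ·) :=
    pairwise_flatMap_replicate _ _ hsortedKeys
  have hpairL : L.Pairwise (· ≤ ·) := by
    have := PySem.List.sorted_pairwise E (fun x => x)
    simpa using this
  have hpairR : r.Pairwise (· ≤ ·) := hpairL.sublist hsub
  apply List.Perm.eq_of_pairwise (fun a b _ _ h1 h2 => le_antisymm h1 h2) hpairA hpairR
  rw [List.perm_iff_count]
  intro x
  rw [hcntr x, hcntL x, hcntE x,
      count_flatMap_replicate _ _ hndsk x, hfin x]
  simp only [PySem.List.mem_sorted, ← hU]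
  by_cases hx : x ∈ H.keys
  · rw [if_pos hx, if_pos hx]
    by_cases hxU : x ∈ U
    · have := hcount x hxU
      have h0 : (0:Nat) ≤ U.count x := Nat.zero_le _
      omega
    · have : U.count x = 0 := List.count_eq_zero.mpr hxU
      rw [this]
      omega
  · rw [if_neg hx, if_neg hx]
    simp
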